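-- pv_equiv track=rewrite | github.com/kaust-cs249-2020/fernando-zhapa | chapter8/_821_leavesDistance.py | pathToRoot
-- ===== SOURCE A (Python) =====
-- def pathToRoot(tree, leaf):
--     parent, weight = tree[leaf]
--     path = []
--     prevWeight = 0
--
--     while parent != -1:
--         path.append((parent, prevWeight+weight))
--
--         node = parent
--         prevWeight += weight
--         parent, weight = tree[node]
--
--     return path
-- ===== SOURCE B (Python) =====
-- def pathToRoot(tree, leaf):
--     # Build the output BACK-TO-FRONT: collect the (ancestor, edge weight)
--     # chain, sum the weights once, then walk the chain from the root end
--     # subtracting each edge weight to recover the cumulative distances.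
--     chain = []
--     node = leaf
--     while True:
--         parent, weight = tree[node]
--         if parent == -1:
--             break
--         chain.append((parent, weight))
--         node = parent
--     out = []
--     remaining = sum(w for _, w in chain)
--     for node_i, w in reversed(chain):
--         out.append((node_i, remaining))
--         remaining -= w
--     out.reverse()
--     return out
-- ===== Notes on version B (the rewrite author's own statement) =====
-- stated objective: alternative
-- what changed: B builds the output back-to-front: it collects the (ancestor, weight) chain, computes the total weight once with sum(), then walks the chain from the root end subtracting each edge weight to recover the cumulative distances, and reverses the result; A computes a running forward cumulative sum while chasing parents.
import Mathlib
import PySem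

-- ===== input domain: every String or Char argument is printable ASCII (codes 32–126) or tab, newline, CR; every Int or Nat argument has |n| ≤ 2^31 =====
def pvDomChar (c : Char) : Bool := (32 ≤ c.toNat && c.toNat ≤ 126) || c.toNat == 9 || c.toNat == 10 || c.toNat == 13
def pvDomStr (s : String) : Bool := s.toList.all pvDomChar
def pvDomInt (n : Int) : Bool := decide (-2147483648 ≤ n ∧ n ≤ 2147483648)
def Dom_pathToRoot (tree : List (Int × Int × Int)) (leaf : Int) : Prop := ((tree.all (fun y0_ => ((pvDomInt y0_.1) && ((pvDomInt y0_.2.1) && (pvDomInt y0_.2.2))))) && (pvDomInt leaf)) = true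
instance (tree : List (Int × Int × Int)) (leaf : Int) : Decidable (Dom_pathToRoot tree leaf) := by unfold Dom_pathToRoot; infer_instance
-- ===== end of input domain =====

-- B builds the output back-to-front: collect the (ancestor, weight) chain, sum the
-- weights once, then walk from the root end subtracting edge weights, and reverse;
-- A keeps a running forward cumulative sum. Alternative decomposition, same cost.

-- dict lookup tree[k] : first match in the association list (none = KeyError)
def lookupPair : List (Int × Int × Int) → Int → Option (Int × Int)
  | [], _ => none
  | (k, pw) :: rest, x => if k == x then some pw else lookupPair rest x

-- ===== PORT A =====
-- the while-loop of A; fuel tree.length+1 suffices on every input Pre_ admits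
def pathLoopA (tree : List (Int × Int × Int)) : Nat → Int → Int → Int → List (Int × Int) → List (Int × Int)
  | 0, _, _, _, path => path
  | fuel + 1, parent, weight, prevWeight, path =>
    if parent ≠ -1 then
      let path' := path ++ [(parent, prevWeight + weight)]
      match lookupPair tree parent with
      | some (p', w') => pathLoopA tree fuel p' w' (prevWeight + weight) path'
      | none => path'        -- Python raises KeyError here; excluded by Pre_
    else path

def pathToRoot (tree : List (Int × Int × Int)) (leaf : Int) : List (Int × Int) :=
  match lookupPair tree leaf with
  | some (parent, weight) => pathLoopA tree (tree.length + 1) parent weight 0 []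
  | none => []               -- Python raises KeyError here; excluded by Pre_

-- ===== PORT B =====
-- phase 1 of B: the 'while True' loop collecting the (ancestor, weight) chain
def collectB (tree : List (Int × Int × Int)) : Nat → Int → List (Int × Int) → List (Int × Int)
  | 0, _, ch => ch
  | fuel + 1, node, ch =>
    match lookupPair tree node with
    | none => ch             -- Python raises KeyError here; excluded by Pre_
    | some (parent, weight) =>
      if parent = -1 then ch
      else collectB tree fuel parent (ch ++ [(parent, weight)])

-- phase 2 of B: the 'for node_i, w in reversed(chain)' loop, subtracting from the total
def emitB : List (Int × Int) → Int → List (Int × Int) → List (Int × Int)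
  | [], _, out => out
  | (n, w) :: rest, remaining, out => emitB rest (remaining - w) (out ++ [(n, remaining)])

def pathToRoot_alt (tree : List (Int × Int × Int)) (leaf : Int) : List (Int × Int) :=
  let chain := collectB tree (tree.length + 1) leaf []
  let total := (chain.map Prod.snd).sum
  (emitB chain.reverse total []).reverse

-- ===== PRECONDITION & SPEC =====
-- Pre_ = the Python returns: the parent chain from leaf reaches -1 with every dict
-- lookup succeeding (otherwise A raises KeyError or loops forever on a cycle).
-- It inspects only the parent pointers of the input, never weights or outputs; the
-- bound tree.length+1 is not a size cap: any terminating chain visits distinct keys,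
-- so it terminates within that many lookups (otherwise A diverges).
def chainTerm (tree : List (Int × Int × Int)) : Nat → Int → Bool
  | 0, _ => false
  | fuel + 1, node =>
    match lookupPair tree node with
    | none => false
    | some (parent, _) => parent == -1 || chainTerm tree fuel parent

def Pre_pathToRoot (tree : List (Int × Int × Int)) (leaf : Int) : Prop :=
  chainTerm tree (tree.length + 1) leaf = true

instance (tree : List (Int × Int × Int)) (leaf : Int) : Decidable (Pre_pathToRoot tree leaf) := by
  unfold Pre_pathToRoot; infer_instance

def pvWitness_pathToRoot : (List (Int × Int × Int)) × Int := ([(1, -1, 0), (0, 1, 3)], 0)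

def Spec_pathToRoot (tree : List (Int × Int × Int)) (leaf : Int) (out : List (Int × Int)) : Prop := out = pathToRoot_alt tree leaf
instance (tree : List (Int × Int × Int)) (leaf : Int) (out : List (Int × Int)) : Decidable (Spec_pathToRoot tree leaf out) := by unfold Spec_pathToRoot; infer_instance

-- ===== CLAIM (what is proved, stated in full; the proofs are below) =====
def Claim_equal_pathToRoot : Prop := ∀ (tree : List (Int × Int × Int)) (leaf : Int), Dom_pathToRoot tree leaf → Pre_pathToRoot tree leaf → Spec_pathToRoot tree leaf (pathToRoot tree leaf)

-- ===== LEMMAS AND PROOFS =====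

theorem pvWitness_ok : Dom_pathToRoot pvWitness_pathToRoot.1 pvWitness_pathToRoot.2 ∧
    Pre_pathToRoot pvWitness_pathToRoot.1 pvWitness_pathToRoot.2 := by decide

-- forward characterisation used only in the proofs: chain with a running prefix sum
def fwd : List (Int × Int) → Int → List (Int × Int)
  | [], _ => []
  | (n, w) :: rest, t => (n, t + w) :: fwd rest (t + w)

-- one-step unfolding equations (rfl) to control rewriting
theorem pathLoopA_step (tree : List (Int × Int × Int)) (f : Nat) (p w t : Int) (path : List (Int × Int)) :
    pathLoopA tree (f + 1) p w t path =
      if p ≠ -1 then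
        match lookupPair tree p with
        | some pw' => pathLoopA tree f pw'.1 pw'.2 (t + w) (path ++ [(p, t + w)])
        | none => path ++ [(p, t + w)]
      else path := by
  simp only [pathLoopA]
  split <;> rename_i h
  · cases hlk : lookupPair tree p with
    | none => simp
    | some pw => obtain ⟨a, b⟩ := pw; simp
  · rfl

theorem collectB_step (tree : List (Int × Int × Int)) (f : Nat) (node : Int) (ch : List (Int × Int)) :
    collectB tree (f + 1) node ch =
      match lookupPair tree node with
      | none => ch
      | some pw =>
        if pw.1 = -1 then ch
        else collectB tree f pw.1 (ch ++ [(pw.1, pw.2)]) := by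
  simp only [collectB]
  cases lookupPair tree node with
  | none => rfl
  | some pw => obtain ⟨a, b⟩ := pw; rfl

-- accumulator lemmas
theorem pathLoopA_acc (tree : List (Int × Int × Int)) (fuel : Nat) :
    ∀ (p w t : Int) (path : List (Int × Int)),
      pathLoopA tree fuel p w t path = path ++ pathLoopA tree fuel p w t [] := by
  induction fuel with
  | zero => intro p w t path; simp [pathLoopA]
  | succ f ih =>
    intro p w t path
    rw [pathLoopA_step, pathLoopA_step]
    by_cases hp : p = -1
    · simp [hp]
    · simp only [hp, ne_eq, not_false_eq_true, if_true]
      cases hlk : lookupPair tree p with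
      | none => simp
      | some pw =>
        simp only
        rw [ih pw.1 pw.2 (t + w) (path ++ [(p, t + w)]), ih pw.1 pw.2 (t + w) ([] ++ [(p, t + w)])]
        simp

theorem collectB_acc (tree : List (Int × Int × Int)) (fuel : Nat) :
    ∀ (node : Int) (ch : List (Int × Int)),
      collectB tree fuel node ch = ch ++ collectB tree fuel node [] := by
  induction fuel with
  | zero => intro node ch; simp [collectB]
  | succ f ih =>
    intro node ch
    rw [collectB_step, collectB_step]
    cases hlk : lookupPair tree node with
    | none => simp
    | some pw =>
      by_cases hp : pw.1 = -1
      · simp [hp]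
      · simp only [hp, if_false]
        rw [ih pw.1 (ch ++ [(pw.1, pw.2)]), ih pw.1 ([] ++ [(pw.1, pw.2)])]
        simp

theorem emitB_acc (l : List (Int × Int)) :
    ∀ (r : Int) (out : List (Int × Int)), emitB l r out = out ++ emitB l r [] := by
  induction l with
  | nil => intro r out; simp [emitB]
  | cons nw rest ih =>
    intro r out
    obtain ⟨n, w⟩ := nw
    simp only [emitB]
    rw [ih (r - w) (out ++ [(n, r)]), ih (r - w) ([] ++ [(n, r)])]
    simp

-- weight sum of a chain
def wsum (l : List (Int × Int)) : Int := (l.map Prod.snd).sum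

theorem emitB_append_last (xs : List (Int × Int)) :
    ∀ (n w r : Int), emitB (xs ++ [(n, w)]) r [] = emitB xs r [] ++ [(n, r - wsum xs)] := by
  induction xs with
  | nil => intro n w r; simp [emitB, wsum]
  | cons mw rest ih =>
    intro n w r
    obtain ⟨m, v⟩ := mw
    simp only [List.cons_append, emitB, List.nil_append]
    rw [emitB_acc (rest ++ [(n, w)]) (r - v) [(m, r)], ih n w (r - v),
        emitB_acc rest (r - v) [(m, r)]]
    simp [wsum]
    ring

-- B's second phase recovers the forward prefix-sum list
theorem fwd_eq_emit (chain : List (Int × Int)) :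
    ∀ (t : Int), fwd chain t = (emitB chain.reverse (t + wsum chain) []).reverse := by
  induction chain with
  | nil => intro t; simp [fwd, emitB]
  | cons nw rest ih =>
    intro t
    obtain ⟨n, w⟩ := nw
    simp only [fwd, List.reverse_cons]
    rw [emitB_append_last, List.reverse_append]
    have hs : wsum ((n, w) :: rest) = w + wsum rest := by simp [wsum]
    have hrs : wsum rest.reverse = wsum rest := by simp [wsum]
    rw [hs, hrs]
    have : t + (w + wsum rest) - wsum rest = t + w := by ring
    rw [this, ih (t + w)]
    have : t + w + wsum rest = t + (w + wsum rest) := by ring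
    rw [this]
    simp

-- A's loop, started just after a lookup returned (p, w) with running sum t,
-- produces the forward prefix-sum list over ((p,w) :: collected chain)
theorem loopA_eq_fwd (tree : List (Int × Int × Int)) (fuel : Nat) :
    ∀ (p w t : Int),
      pathLoopA tree (fuel + 1) p w t [] =
        (if p = -1 then [] else fwd ((p, w) :: collectB tree fuel p []) t) := by
  induction fuel with
  | zero =>
    intro p w t
    rw [pathLoopA_step]
    by_cases hp : p = -1
    · simp [hp]
    · simp only [hp, ne_eq, not_false_eq_true, if_true, if_false, collectB, fwd]
      cases hlk : lookupPair tree p with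
      | none => simp
      | some pw => simp [pathLoopA]
  | succ f ih =>
    intro p w t
    rw [pathLoopA_step]
    by_cases hp : p = -1
    · simp [hp]
    · simp only [hp, ne_eq, not_false_eq_true, if_true, if_false]
      rw [collectB_step]
      cases hlk : lookupPair tree p with
      | none => simp [fwd]
      | some pw =>
        obtain ⟨p', w'⟩ := pw
        simp only
        by_cases hp' : p' = -1
        · have hz : pathLoopA tree (f + 1) p' w' (t + w) [] = [] := by
            rw [pathLoopA_step]; simp [hp']
          rw [pathLoopA_acc tree (f + 1) p' w' (t + w), hz]
          simp [hp', fwd]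
        · simp only [hp', if_false]
          rw [pathLoopA_acc tree (f + 1) p' w' (t + w), ih p' w' (t + w)]
          rw [collectB_acc tree f p' ([] ++ [(p', w')])]
          simp [hp', fwd]

theorem unconditional_eq (tree : List (Int × Int × Int)) (leaf : Int) :
    pathToRoot tree leaf = pathToRoot_alt tree leaf := by
  unfold pathToRoot pathToRoot_alt
  cases hlk : lookupPair tree leaf with
  | none => simp [collectB_step, hlk, emitB]
  | some pw =>
    obtain ⟨p, w⟩ := pw
    simp only
    rw [loopA_eq_fwd tree tree.length p w 0, collectB_step, hlk]
    by_cases hp : p = -1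
    · simp [hp, emitB]
    · simp only [hp, if_false]
      rw [collectB_acc tree tree.length p ([] ++ [(p, w)])]
      have := fwd_eq_emit ((p, w) :: collectB tree tree.length p []) 0
      rw [this]
      have hw : wsum ((p, w) :: collectB tree tree.length p []) =
          (((p, w) :: collectB tree tree.length p []).map Prod.snd).sum := rfl
      simp [wsum]

-- ===== VERDICT (by name: the statement is the Claim_ definition above) =====
theorem pathToRoot_spec : Claim_equal_pathToRoot := by
  intro tree leaf _ _
  unfold Spec_pathToRoot
  exact unconditional_eq tree leaf
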